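-- pv_equiv track=rewrite | github.com/DataGemnon/portfolio-news-alert | services/broker_upgrades_service.py | _separate_by_type_and_portfolio
-- ===== SOURCE A (Python) =====
-- from typing import List, Dict, Set
--
-- def _separate_by_type_and_portfolio(all_changes: List[Dict],
--                                      portfolio_symbols: Set[str]) -> Dict:
--     """
--     Separate rating changes into categories:
--     - Portfolio upgrades/downgrades (most important)
--     - Market upgrades/downgrades (opportunities)
--     """
--     portfolio_upgrades = []
--     portfolio_downgrades = []
--     market_upgrades = []
--     market_downgrades = []
--
--     for change in all_changes:
--         is_portfolio = change['symbol'] in portfolio_symbols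
--         action_type = change.get('action_type', '')
--
--         is_positive = action_type in ['upgrade', 'initiated', 'target_raised'] or \
--                      (action_type == 'initiated' and change.get('new_rating_class') == 'bullish')
--         is_negative = action_type in ['downgrade', 'target_lowered'] or \
--                      (action_type == 'initiated' and change.get('new_rating_class') == 'bearish')
--
--         if is_portfolio:
--             if is_negative:
--                 portfolio_downgrades.append(change)
--             elif is_positive:
--                 portfolio_upgrades.append(change)
--         else:
--             if is_negative:
--                 market_downgrades.append(change)
--             elif is_positive:
--                 market_upgrades.append(change)
--
--     return {
--         'portfolio_upgrades': portfolio_upgrades[:10],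
--         'portfolio_downgrades': portfolio_downgrades[:10],  # NEW! Critical for risk management
--         'market_upgrades': market_upgrades[:10],
--         'market_downgrades': market_downgrades[:10]
--     }
-- ===== SOURCE B (Python) =====
-- def _separate_by_type_and_portfolio(all_changes, portfolio_symbols):
--     def in_portfolio(c):
--         return c['symbol'] in portfolio_symbols
--
--     def is_positive(c):
--         action_type = c.get('action_type', '')
--         return action_type in ['upgrade', 'initiated', 'target_raised'] or \
--             (action_type == 'initiated' and c.get('new_rating_class') == 'bullish')
--
--     def is_negative(c):
--         action_type = c.get('action_type', '')
--         return action_type in ['downgrade', 'target_lowered'] or \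
--             (action_type == 'initiated' and c.get('new_rating_class') == 'bearish')
--
--     return {
--         'portfolio_upgrades': [c for c in all_changes
--                                if in_portfolio(c) and is_positive(c) and not is_negative(c)][:10],
--         'portfolio_downgrades': [c for c in all_changes
--                                  if in_portfolio(c) and is_negative(c)][:10],
--         'market_upgrades': [c for c in all_changes
--                             if not in_portfolio(c) and is_positive(c) and not is_negative(c)][:10],
--         'market_downgrades': [c for c in all_changes
--                               if not in_portfolio(c) and is_negative(c)][:10],
--     }
-- ===== Notes on version B (the rewrite author's own statement) =====
-- stated objective: alternative
-- what changed: Replaces the single pass with four mutable accumulator lists and nested branching by three named predicates and four independent filtering comprehensions, one per bucket, with negative-over-positive precedence expressed as 'is_positive and not is_negative'.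
import Mathlib
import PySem

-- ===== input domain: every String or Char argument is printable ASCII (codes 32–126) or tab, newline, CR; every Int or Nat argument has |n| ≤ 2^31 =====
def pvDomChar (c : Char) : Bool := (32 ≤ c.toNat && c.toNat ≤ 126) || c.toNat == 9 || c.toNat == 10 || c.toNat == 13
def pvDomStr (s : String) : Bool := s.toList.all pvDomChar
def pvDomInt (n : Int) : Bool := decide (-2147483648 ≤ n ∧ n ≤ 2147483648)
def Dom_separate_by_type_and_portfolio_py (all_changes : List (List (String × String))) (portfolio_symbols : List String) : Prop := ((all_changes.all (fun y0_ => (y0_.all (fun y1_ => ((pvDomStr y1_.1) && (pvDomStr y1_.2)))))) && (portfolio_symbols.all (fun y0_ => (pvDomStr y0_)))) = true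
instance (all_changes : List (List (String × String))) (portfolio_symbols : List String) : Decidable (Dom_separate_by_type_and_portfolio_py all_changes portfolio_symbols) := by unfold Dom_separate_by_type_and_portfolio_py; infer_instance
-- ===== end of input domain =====

-- ===== PORT A =====
-- B changes the decomposition: A's one pass with four accumulators becomes four independent
-- filters, one per bucket (objective: alternative; equivalence is about the return value).
-- first-match association-list lookup = Python dict .get (dict keys are unique); exact.
def dget? (c : List (String × String)) (k : String) : Option String :=
  (c.find? (fun p => p.1 == k)).map (·.2)

-- the loop of A: one pass, four accumulator lists, nested branches (Python appends ported as ++ [c])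
def sbLoop (ps : List String) : List (List (String × String)) →
    (List (List (String × String)) × List (List (String × String)) × List (List (String × String)) × List (List (String × String))) →
    (List (List (String × String)) × List (List (String × String)) × List (List (String × String)) × List (List (String × String)))
  | [], acc => acc
  | c :: rest, (pu, pd, mu, md) =>
    let is_portfolio := ps.contains ((dget? c "symbol").getD "")
    let is_positive := ((dget? c "action_type").getD "" == "upgrade" || (dget? c "action_type").getD "" == "initiated" || (dget? c "action_type").getD "" == "target_raised")
        || ((dget? c "action_type").getD "" == "initiated" && dget? c "new_rating_class" == some "bullish")
    let is_negative := ((dget? c "action_type").getD "" == "downgrade" || (dget? c "action_type").getD "" == "target_lowered")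
        || ((dget? c "action_type").getD "" == "initiated" && dget? c "new_rating_class" == some "bearish")
    if is_portfolio then
      if is_negative then sbLoop ps rest (pu, pd ++ [c], mu, md)
      else if is_positive then sbLoop ps rest (pu ++ [c], pd, mu, md)
      else sbLoop ps rest (pu, pd, mu, md)
    else
      if is_negative then sbLoop ps rest (pu, pd, mu, md ++ [c])
      else if is_positive then sbLoop ps rest (pu, pd, mu ++ [c], md)
      else sbLoop ps rest (pu, pd, mu, md)

def separate_by_type_and_portfolio_py (all_changes : List (List (String × String))) (portfolio_symbols : List String) : List (String × List (List (String × String))) :=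
  let r := sbLoop portfolio_symbols all_changes ([], [], [], [])
  [("portfolio_upgrades", r.1.take 10),
   ("portfolio_downgrades", r.2.1.take 10),
   ("market_upgrades", r.2.2.1.take 10),
   ("market_downgrades", r.2.2.2.take 10)]

-- ===== PORT B =====
def inPortfolioB (ps : List String) (c : List (String × String)) : Bool :=
  ps.contains ((dget? c "symbol").getD "")

def isPositiveB (c : List (String × String)) : Bool :=
  ((dget? c "action_type").getD "" == "upgrade" || (dget? c "action_type").getD "" == "initiated" || (dget? c "action_type").getD "" == "target_raised")
    || ((dget? c "action_type").getD "" == "initiated" && dget? c "new_rating_class" == some "bullish")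

def isNegativeB (c : List (String × String)) : Bool :=
  ((dget? c "action_type").getD "" == "downgrade" || (dget? c "action_type").getD "" == "target_lowered")
    || ((dget? c "action_type").getD "" == "initiated" && dget? c "new_rating_class" == some "bearish")

def separate_by_type_and_portfolio_py_alt (all_changes : List (List (String × String))) (portfolio_symbols : List String) : List (String × List (List (String × String))) :=
  [("portfolio_upgrades", (all_changes.filter (fun c => inPortfolioB portfolio_symbols c && isPositiveB c && !isNegativeB c)).take 10),
   ("portfolio_downgrades", (all_changes.filter (fun c => inPortfolioB portfolio_symbols c && isNegativeB c)).take 10),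
   ("market_upgrades", (all_changes.filter (fun c => !inPortfolioB portfolio_symbols c && isPositiveB c && !isNegativeB c)).take 10),
   ("market_downgrades", (all_changes.filter (fun c => !inPortfolioB portfolio_symbols c && isNegativeB c)).take 10)]

-- ===== PRECONDITION & SPEC =====
-- Pre_ excludes exactly the inputs where some change lacks the 'symbol' key: there Python A
-- (and Python B alike) raises KeyError.
def Pre_separate_by_type_and_portfolio_py (all_changes : List (List (String × String))) (portfolio_symbols : List String) : Prop :=
  ∀ c ∈ all_changes, "symbol" ∈ c.map Prod.fst

instance (all_changes : List (List (String × String))) (portfolio_symbols : List String) : Decidable (Pre_separate_by_type_and_portfolio_py all_changes portfolio_symbols) := by unfold Pre_separate_by_type_and_portfolio_py; infer_instance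

def pvWitness_separate_by_type_and_portfolio_py : (List (List (String × String))) × List String :=
  ([[("symbol", "AAPL"), ("action_type", "upgrade")], [("symbol", "MSFT"), ("action_type", "downgrade")]], ["AAPL"])

def Spec_separate_by_type_and_portfolio_py (all_changes : List (List (String × String))) (portfolio_symbols : List String) (out : List (String × List (List (String × String)))) : Prop := out = separate_by_type_and_portfolio_py_alt all_changes portfolio_symbols
instance (all_changes : List (List (String × String))) (portfolio_symbols : List String) (out : List (String × List (List (String × String)))) : Decidable (Spec_separate_by_type_and_portfolio_py all_changes portfolio_symbols out) := by unfold Spec_separate_by_type_and_portfolio_py; infer_instance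

-- ===== CLAIM (what is proved, stated in full; the proofs are below) =====
def Claim_equal_separate_by_type_and_portfolio_py : Prop := ∀ (all_changes : List (List (String × String))) (portfolio_symbols : List String), Dom_separate_by_type_and_portfolio_py all_changes portfolio_symbols → Pre_separate_by_type_and_portfolio_py all_changes portfolio_symbols → Spec_separate_by_type_and_portfolio_py all_changes portfolio_symbols (separate_by_type_and_portfolio_py all_changes portfolio_symbols)

-- ===== LEMMAS AND PROOFS =====
-- invariant of A's loop: each accumulator ends as its start value ++ B's filter of the remaining changes
theorem sbLoop_eq (ps : List String) (cs : List (List (String × String)))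
    (pu pd mu md : List (List (String × String))) :
    sbLoop ps cs (pu, pd, mu, md) =
      (pu ++ cs.filter (fun c => inPortfolioB ps c && isPositiveB c && !isNegativeB c),
       pd ++ cs.filter (fun c => inPortfolioB ps c && isNegativeB c),
       mu ++ cs.filter (fun c => !inPortfolioB ps c && isPositiveB c && !isNegativeB c),
       md ++ cs.filter (fun c => !inPortfolioB ps c && isNegativeB c)) := by
  induction cs generalizing pu pd mu md with
  | nil => simp [sbLoop]
  | cons c rest ih =>
    show (if inPortfolioB ps c then
        if isNegativeB c then sbLoop ps rest (pu, pd ++ [c], mu, md)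
        else if isPositiveB c then sbLoop ps rest (pu ++ [c], pd, mu, md)
        else sbLoop ps rest (pu, pd, mu, md)
      else
        if isNegativeB c then sbLoop ps rest (pu, pd, mu, md ++ [c])
        else if isPositiveB c then sbLoop ps rest (pu, pd, mu ++ [c], md)
        else sbLoop ps rest (pu, pd, mu, md)) = _
    by_cases hp : inPortfolioB ps c <;> by_cases hn : isNegativeB c <;> by_cases hq : isPositiveB c <;>
      simp [hp, hn, hq, ih]

-- ===== VERDICT (by name: the statement is the Claim_ definition above) =====
theorem separate_by_type_and_portfolio_py_spec : Claim_equal_separate_by_type_and_portfolio_py := by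
  intro all_changes portfolio_symbols _ _
  show separate_by_type_and_portfolio_py all_changes portfolio_symbols = _
  simp [separate_by_type_and_portfolio_py, separate_by_type_and_portfolio_py_alt, sbLoop_eq]
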